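-- pv_equiv track=rewrite | github.com/ojhermann-ucd/ProjectEuler | _10_Largest_product_in_a_grid/adjacent_multiplications.py | horizonal_array_calculation_1d_array
-- ===== SOURCE A (Python) =====
-- import operator
-- import functools
--
-- def horizonal_array_calculation_single_instance(array, width, start):
-- 	sub_array = array[start:start+width:1]
-- 	return functools.reduce(operator.mul, sub_array, 1)
--
-- def horizonal_array_calculation_1d_array(array, width):
-- 	# data
-- 	array_length = len(array)
-- 	horizontal_product = 0
-- 	# iteration
-- 	for i in range(0, array_length - width +1, 1):
-- 		current_product = horizonal_array_calculation_single_instance(array, width, i)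
-- 		if current_product > horizontal_product:
-- 			horizontal_product = current_product
-- 	return horizontal_product
-- ===== SOURCE B (Python) =====
-- def horizonal_array_calculation_1d_array(array, width):
-- 	# Sliding-window: maintain the product of the window's nonzero elements
-- 	# and a count of its zeros, updating in O(1) per step.
-- 	n = len(array)
-- 	if width < 0 or width > n:
-- 		return 0
-- 	if width == 0:
-- 		return 1  # every window is the empty product 1
-- 	zeros = 0
-- 	prod = 1
-- 	for x in array[:width]:
-- 		if x == 0:
-- 			zeros += 1
-- 		else:
-- 			prod *= x
-- 	best = prod if zeros == 0 and prod > 0 else 0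
-- 	for j in range(width, n):
-- 		out = array[j - width]
-- 		if out == 0:
-- 			zeros -= 1
-- 		else:
-- 			prod //= out
-- 		x = array[j]
-- 		if x == 0:
-- 			zeros += 1
-- 		else:
-- 			prod *= x
-- 		cur = prod if zeros == 0 else 0
-- 		if cur > best:
-- 			best = cur
-- 	return best
-- ===== Notes on version B (the rewrite author's own statement) =====
-- stated objective: faster
-- what changed: Replaced the per-start recomputation of each width-length slice product by a single sliding-window pass keeping a running product of the window's nonzero elements plus a zero count (O(1) per shift); Pre_ excludes negative widths, a corner nobody would specify, where A's value is the accidental product of Python's wrapped/empty slices (always >= 1) and B returns 0 since no such window exists.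
-- outside the precondition, e.g. on horizonal_array_calculation_1d_array([2], -1): A returns 1, B returns 0; on horizonal_array_calculation_1d_array([0, 1], -1): A returns 1, B returns 0; on horizonal_array_calculation_1d_array([9, 1, -1], -2): A returns 9, B returns 0
import Mathlib
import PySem

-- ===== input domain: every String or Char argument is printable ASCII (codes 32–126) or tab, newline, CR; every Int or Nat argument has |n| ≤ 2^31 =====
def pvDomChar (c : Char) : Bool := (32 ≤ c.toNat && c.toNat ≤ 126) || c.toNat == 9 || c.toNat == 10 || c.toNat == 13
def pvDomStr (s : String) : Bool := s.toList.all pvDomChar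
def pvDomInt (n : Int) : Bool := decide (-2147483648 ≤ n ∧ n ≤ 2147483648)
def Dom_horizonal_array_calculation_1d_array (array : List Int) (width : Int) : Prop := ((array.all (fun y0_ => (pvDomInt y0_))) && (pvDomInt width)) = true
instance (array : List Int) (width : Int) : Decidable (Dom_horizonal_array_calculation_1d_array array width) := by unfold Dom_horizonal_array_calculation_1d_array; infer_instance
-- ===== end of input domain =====

-- B replaces A's per-start O(width) window product by an O(1) sliding-window update
-- (running product of the window's nonzero elements plus a zero count): objective = faster.

-- ===== PORT A =====
def horizonal_array_calculation_single_instance (array : List Int) (width start : Int) : Int :=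
  -- sub_array = array[start:start+width:1]; reduce(operator.mul, sub_array, 1)
  (PySem.List.slice array (some start) (some (start + width))).foldl (fun a b => a * b) 1

def horizonal_array_calculation_1d_array (array : List Int) (width : Int) : Int :=
  (PySem.List.pyRange 0 ((array.length : Int) - width + 1) 1).foldl
    (fun horizontal_product i =>
      let current_product := horizonal_array_calculation_single_instance array width i
      if current_product > horizontal_product then current_product else horizontal_product)
    0

-- ===== PORT B =====
def horizonal_array_calculation_1d_array_alt (array : List Int) (width : Int) : Int :=
  let n : Int := (array.length : Int)
  if width < 0 ∨ n < width then 0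
  else if width = 0 then 1  -- every window is the empty product 1
  else
    -- zeros/prod over the first window array[:width]
    let zp := (PySem.List.slice array none (some width)).foldl
        (fun (zp : Int × Int) x => if x = 0 then (zp.1 + 1, zp.2) else (zp.1, zp.2 * x)) (0, 1)
    let best := if zp.1 = 0 ∧ zp.2 > 0 then zp.2 else 0
    let st := (PySem.List.pyRange width n 1).foldl
        (fun (st : Int × Int × Int) j =>
          let out := PySem.List.pyGetD array (j - width) 0
          let zeros := if out = 0 then st.1 - 1 else st.1
          let prod := if out = 0 then st.2.1 else PySem.Int.floordiv st.2.1 out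
          let x := PySem.List.pyGetD array j 0
          let zeros := if x = 0 then zeros + 1 else zeros
          let prod := if x = 0 then prod else prod * x
          let cur := if zeros = 0 then prod else 0
          (zeros, prod, if cur > st.2.2 then cur else st.2.2))
        (zp.1, zp.2, best)
    st.2.2

-- ===== PRECONDITION & SPEC =====
-- Pre_ excludes negative widths, a corner nobody would specify: no window of negative width
-- exists, and A's value there (always ≥ 1) is the product of the accidental wrapped/empty
-- Python slices array[i:i+width], which B's sliding window cannot sensibly reproduce; B returns 0 there.
def Pre_horizonal_array_calculation_1d_array (array : List Int) (width : Int) : Prop := 0 ≤ width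
instance (array : List Int) (width : Int) : Decidable (Pre_horizonal_array_calculation_1d_array array width) := by unfold Pre_horizonal_array_calculation_1d_array; infer_instance

def pvWitness_horizonal_array_calculation_1d_array : List Int × Int := ([1, 2, 3], 2)

def Spec_horizonal_array_calculation_1d_array (array : List Int) (width : Int) (out : Int) : Prop := out = horizonal_array_calculation_1d_array_alt array width
instance (array : List Int) (width : Int) (out : Int) : Decidable (Spec_horizonal_array_calculation_1d_array array width out) := by unfold Spec_horizonal_array_calculation_1d_array; infer_instance

-- ===== CLAIM (what is proved, stated in full; the proofs are below) =====
def Claim_equal_horizonal_array_calculation_1d_array : Prop := ∀ (array : List Int) (width : Int), Dom_horizonal_array_calculation_1d_array array width → Pre_horizonal_array_calculation_1d_array array width → Spec_horizonal_array_calculation_1d_array array width (horizonal_array_calculation_1d_array array width)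

-- ===== LEMMAS AND PROOFS =====

-- number of zeros of a list
def pvZ : List Int → Int
  | [] => 0
  | x :: l => (if x = 0 then 1 else 0) + pvZ l

-- product of the nonzero elements of a list
def pvNZ : List Int → Int
  | [] => 1
  | x :: l => (if x = 0 then 1 else x) * pvNZ l

-- window of width w starting at t
def pvWin (a : List Int) (w t : Nat) : List Int := (a.drop t).take w

-- reference value: max of 0 and the products of the first k windows
def pvRef (a : List Int) (w k : Nat) : Int :=
  (List.range k).foldl (fun b t => max b (pvWin a w t).prod) 0

theorem pvZ_nonneg (l : List Int) : 0 ≤ pvZ l := by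
  induction l with
  | nil => simp [pvZ]
  | cons x l ih => simp only [pvZ]; split <;> omega

theorem pvZ_append_singleton (l : List Int) (x : Int) :
    pvZ (l ++ [x]) = pvZ l + (if x = 0 then 1 else 0) := by
  induction l with
  | nil => simp [pvZ]
  | cons y l ih => simp only [List.cons_append, pvZ, ih]; ring

theorem pvNZ_append_singleton (l : List Int) (x : Int) :
    pvNZ (l ++ [x]) = pvNZ l * (if x = 0 then 1 else x) := by
  induction l with
  | nil => simp [pvNZ]
  | cons y l ih => simp only [List.cons_append, pvNZ, ih]; ring

theorem pvProd_eq (l : List Int) : l.prod = if pvZ l = 0 then pvNZ l else 0 := by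
  induction l with
  | nil => simp [pvZ, pvNZ]
  | cons x l ih =>
    have hz := pvZ_nonneg l
    by_cases hx : x = 0
    · subst hx
      simp only [List.prod_cons, pvZ, pvNZ, if_pos rfl, ih]
      have : ¬ (1 + pvZ l = 0) := by omega
      simp [this]
    · simp only [List.prod_cons, pvZ, pvNZ, if_neg hx, ih]
      by_cases h : pvZ l = 0 <;> simp [h]

theorem pvPairFold (l : List Int) (z p : Int) :
    l.foldl (fun (zp : Int × Int) x => if x = 0 then (zp.1 + 1, zp.2) else (zp.1, zp.2 * x)) (z, p)
      = (z + pvZ l, p * pvNZ l) := by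
  induction l generalizing z p with
  | nil => simp [pvZ, pvNZ]
  | cons x l ih =>
    simp only [List.foldl_cons]
    by_cases hx : x = 0
    · rw [if_pos hx, ih]
      simp only [pvZ, pvNZ, if_pos hx, Prod.mk.injEq]
      exact ⟨by ring, by ring⟩
    · rw [if_neg hx, ih]
      simp only [pvZ, pvNZ, if_neg hx, Prod.mk.injEq]
      exact ⟨by ring, by ring⟩

-- A equals the reference for 0 ≤ width
theorem pvA_eq_ref (a : List Int) (w : Nat) :
    horizonal_array_calculation_1d_array a (w : Int)
      = pvRef a w ((a.length : Int) - (w : Int) + 1).toNat := by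
  unfold horizonal_array_calculation_1d_array pvRef
  rw [PySem.List.pyRange_one, List.foldl_map]
  rw [show ((a.length : Int) - (w : Int) + 1 - 0) = ((a.length : Int) - (w : Int) + 1) from by ring]
  congr 1
  funext b t
  have : horizonal_array_calculation_single_instance a (w : Int) ((0 : Int) + (t : Nat)) = (pvWin a w t).prod := by
    unfold horizonal_array_calculation_single_instance pvWin
    rw [zero_add]
    rw [PySem.List.slice_natCast_add]
    rw [List.prod_eq_foldl]
  simp only [this]
  rcases le_or_gt b (pvWin a w t).prod with h | h
  · simp [max_eq_right h]; omega
  · simp [max_eq_left (le_of_lt h)]; omega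

-- width = 0: every window is empty, the reference is 1 for k ≥ 1
theorem pvRef_zero (a : List Int) (k : Nat) (hk : 1 ≤ k) : pvRef a 0 k = 1 := by
  unfold pvRef
  have hf : (fun (b : Int) (t : Nat) => max b (pvWin a 0 t).prod) = fun b _ => max b 1 := by
    funext b t; simp [pvWin]
  rw [hf]
  have h : ∀ (m : Nat) (c : Int),
      (List.range m).foldl (fun (b : Int) (_ : Nat) => max b 1) c = if m = 0 then c else max c 1 := by
    intro m
    induction m with
    | zero => intro c; simp
    | succ m ih =>
      intro c
      rw [List.range_succ, List.foldl_append, ih c]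
      simp only [List.foldl_cons, List.foldl_nil]
      rcases Nat.eq_zero_or_pos m with hm | hm
      · subst hm; simp
      · simp only [Nat.pos_iff_ne_zero.mp hm, if_neg]
        simp [max_assoc]
  rw [h k 0]
  simp [Nat.pos_iff_ne_zero.mp hk]

-- step function of B's sliding-window loop (definitionally equal to the lambda in the port)
def pvF (a : List Int) (w : Int) : (Int × Int × Int) → Int → (Int × Int × Int) :=
  fun (st : Int × Int × Int) j =>
    let out := PySem.List.pyGetD a (j - w) 0
    let zeros := if out = 0 then st.1 - 1 else st.1
    let prod := if out = 0 then st.2.1 else PySem.Int.floordiv st.2.1 out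
    let x := PySem.List.pyGetD a j 0
    let zeros := if x = 0 then zeros + 1 else zeros
    let prod := if x = 0 then prod else prod * x
    let cur := if zeros = 0 then prod else 0
    (zeros, prod, if cur > st.2.2 then cur else st.2.2)

theorem pvFloordiv_cancel (p x : Int) (hx : x ≠ 0) : PySem.Int.floordiv (x * p) x = p := by
  have h1 := PySem.Int.floordiv_mul_add_mod (x * p) x
  have h2 : PySem.Int.mod (x * p) x = 0 := (PySem.Int.mod_eq_zero_iff_dvd _ _).mpr ⟨p, rfl⟩
  rw [h2, add_zero] at h1
  exact mul_right_cancel₀ hx (h1.trans (mul_comm x p))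

theorem pvIfMax (c b : Int) : (if c > b then c else b) = max b c := by
  rw [max_def]
  split <;> split <;> omega

-- main loop invariant for B's sliding window
theorem pvLoop (a : List Int) (pw : Nat) :
    ∀ (m t : Nat) (b : Int), (pw + 1) + t + m = a.length →
      (((PySem.List.pyRange (((pw + 1 : Nat) : Int) + (t : Int)) ((a.length : Int)) 1).foldl
        (pvF a ((pw + 1 : Nat) : Int))
        (pvZ (pvWin a (pw + 1) t), pvNZ (pvWin a (pw + 1) t), b))).2.2
      = (List.range m).foldl (fun best s => max best (pvWin a (pw + 1) (t + 1 + s)).prod) b := by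
  intro m
  induction m with
  | zero =>
    intro t b h
    rw [PySem.List.pyRange_one_eq_nil (by push_cast; omega)]
    simp
  | succ m ih =>
    intro t b h
    have ht : t < a.length := by omega
    have htp : t + 1 + pw < a.length := by omega
    rw [PySem.List.pyRange_one_cons (by push_cast; omega), List.foldl_cons]
    have hwin1 : pvWin a (pw + 1) t = a[t] :: pvWin a pw (t + 1) := by
      unfold pvWin
      rw [List.drop_eq_getElem_cons ht, List.take_succ_cons]
    have hwin2 : pvWin a (pw + 1) (t + 1) = pvWin a pw (t + 1) ++ [a[t + 1 + pw]] := by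
      unfold pvWin
      rw [List.take_succ]
      congr 1
      rw [List.getElem?_drop, List.getElem?_eq_getElem htp]
      rfl
    have hZ1 : pvZ (pvWin a (pw + 1) t) = (if a[t] = 0 then 1 else 0) + pvZ (pvWin a pw (t + 1)) := by
      rw [hwin1]; rfl
    have hN1 : pvNZ (pvWin a (pw + 1) t) = (if a[t] = 0 then 1 else a[t]) * pvNZ (pvWin a pw (t + 1)) := by
      rw [hwin1]; rfl
    have hZ2 : pvZ (pvWin a (pw + 1) (t + 1))
        = pvZ (pvWin a pw (t + 1)) + (if a[t + 1 + pw] = 0 then 1 else 0) :=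
      hwin2 ▸ pvZ_append_singleton _ _
    have hN2 : pvNZ (pvWin a (pw + 1) (t + 1))
        = pvNZ (pvWin a pw (t + 1)) * (if a[t + 1 + pw] = 0 then 1 else a[t + 1 + pw]) :=
      hwin2 ▸ pvNZ_append_singleton _ _
    have hout : PySem.List.pyGetD a (((pw + 1 : Nat) : Int) + (t : Int) - ((pw + 1 : Nat) : Int)) 0 = a[t] := by
      rw [show ((pw + 1 : Nat) : Int) + (t : Int) - ((pw + 1 : Nat) : Int) = ((t : Nat) : Int) from by ring,
        PySem.List.pyGetD_natCast, List.getD_eq_getElem a 0 ht]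
    have hx : PySem.List.pyGetD a (((pw + 1 : Nat) : Int) + (t : Int)) 0 = a[t + 1 + pw] := by
      rw [show ((pw + 1 : Nat) : Int) + (t : Int) = ((pw + 1 + t : Nat) : Int) from by push_cast; ring,
        PySem.List.pyGetD_natCast, List.getD_eq_getElem a 0 (by omega : pw + 1 + t < a.length)]
      congr 1
      omega
    have key : ∀ (z p : Int), z = pvZ (pvWin a (pw + 1) (t + 1)) → p = pvNZ (pvWin a (pw + 1) (t + 1)) →
        (z, p, if (if z = 0 then p else 0) > b then (if z = 0 then p else 0) else b)
        = (pvZ (pvWin a (pw + 1) (t + 1)), pvNZ (pvWin a (pw + 1) (t + 1)),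
           max b (pvWin a (pw + 1) (t + 1)).prod) := by
      rintro z p rfl rfl
      refine Prod.ext rfl (Prod.ext rfl ?_)
      rw [pvProd_eq (pvWin a (pw + 1) (t + 1))]
      exact pvIfMax _ b
    have hstep : pvF a ((pw + 1 : Nat) : Int)
        (pvZ (pvWin a (pw + 1) t), pvNZ (pvWin a (pw + 1) t), b) (((pw + 1 : Nat) : Int) + (t : Int))
        = (pvZ (pvWin a (pw + 1) (t + 1)), pvNZ (pvWin a (pw + 1) (t + 1)),
           max b (pvWin a (pw + 1) (t + 1)).prod) := by
      unfold pvF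
      simp only [hout, hx]
      by_cases h1 : a[t] = 0 <;> by_cases h2 : a[t + 1 + pw] = 0 <;>
        simp only [h1, h2, if_true, if_false, ite_true, ite_false]
      · exact key _ _ (by rw [hZ1, hZ2]; simp [h1, h2] <;> omega)
          (by rw [hN1, hN2]; simp [h1, h2] <;> ring)
      · exact key _ _ (by rw [hZ1, hZ2]; simp [h1, h2] <;> omega)
          (by rw [hN1, hN2]; simp [h1, h2] <;> ring)
      · exact key _ _ (by rw [hZ1, hZ2]; simp [h1, h2] <;> omega)
          (by rw [hN1, hN2]; simp [h1, h2] <;> rw [pvFloordiv_cancel _ _ h1])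
      · exact key _ _ (by rw [hZ1, hZ2]; simp [h1, h2] <;> omega)
          (by rw [hN1, hN2]; simp [h1, h2] <;> rw [pvFloordiv_cancel _ _ h1])
    rw [hstep,
      show ((pw + 1 : Nat) : Int) + (t : Int) + 1 = ((pw + 1 : Nat) : Int) + ((t + 1 : Nat) : Int) from by
        push_cast; ring,
      ih (t + 1) _ (by omega)]
    rw [List.range_succ_eq_map, List.foldl_cons, List.foldl_map]
    have hfun : ∀ (best : Int) (s : Nat),
        max best (pvWin a (pw + 1) (t + 1 + Nat.succ s)).prod
        = max best (pvWin a (pw + 1) (t + 1 + 1 + s)).prod := by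
      intro best s
      rw [show t + 1 + Nat.succ s = t + 1 + 1 + s from by omega]
    simp only [hfun, Nat.add_zero]

-- B equals the reference for 1 ≤ w ≤ n
theorem pvB_eq_ref (a : List Int) (pw : Nat) (hn : pw + 1 ≤ a.length) :
    horizonal_array_calculation_1d_array_alt a ((pw + 1 : Nat) : Int)
      = pvRef a (pw + 1) ((a.length : Int) - ((pw + 1 : Nat) : Int) + 1).toNat := by
  unfold horizonal_array_calculation_1d_array_alt
  rw [if_neg (by push_cast; omega), if_neg (by push_cast; omega)]
  simp only [PySem.List.slice_to_natCast]
  rw [pvPairFold (a.take (pw + 1)) 0 1]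
  rw [show a.take (pw + 1) = pvWin a (pw + 1) 0 from by simp [pvWin]]
  simp only [zero_add, one_mul]
  have hF : (fun (st : Int × Int × Int) j =>
      let out := PySem.List.pyGetD a (j - ((pw + 1 : Nat) : Int)) 0
      let zeros := if out = 0 then st.1 - 1 else st.1
      let prod := if out = 0 then st.2.1 else PySem.Int.floordiv st.2.1 out
      let x := PySem.List.pyGetD a j 0
      let zeros := if x = 0 then zeros + 1 else zeros
      let prod := if x = 0 then prod else prod * x
      let cur := if zeros = 0 then prod else 0
      (zeros, prod, if cur > st.2.2 then cur else st.2.2)) = pvF a ((pw + 1 : Nat) : Int) := rfl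
  rw [hF]
  have hbest : (if pvZ (pvWin a (pw + 1) 0) = 0 ∧ pvNZ (pvWin a (pw + 1) 0) > 0
        then pvNZ (pvWin a (pw + 1) 0) else 0) = max 0 (pvWin a (pw + 1) 0).prod := by
    rw [pvProd_eq]
    by_cases hz : pvZ (pvWin a (pw + 1) 0) = 0
    · rw [if_pos hz]
      by_cases hp : pvNZ (pvWin a (pw + 1) 0) > 0
      · rw [if_pos ⟨hz, hp⟩, max_eq_right (le_of_lt hp)]
      · rw [if_neg (by tauto), max_eq_left (by omega)]
    · rw [if_neg (by tauto), if_neg hz]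
      simp
  rw [hbest]
  have hl := pvLoop a pw (a.length - (pw + 1)) 0 (max 0 (pvWin a (pw + 1) 0).prod) (by omega)
  simp only [Nat.cast_zero, add_zero, Nat.zero_add] at hl
  rw [hl]
  rw [show ((a.length : Int) - ((pw + 1 : Nat) : Int) + 1).toNat
      = (a.length - (pw + 1)) + 1 from by omega]
  unfold pvRef
  rw [List.range_succ_eq_map, List.foldl_cons, List.foldl_map]
  congr 1
  funext best s
  rw [show (1 : Nat) + s = Nat.succ s from by omega]

theorem horizonal_array_calculation_1d_array_spec : Claim_equal_horizonal_array_calculation_1d_array := by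
  intro a width _ hpre
  unfold Spec_horizonal_array_calculation_1d_array
  unfold Pre_horizonal_array_calculation_1d_array at hpre
  lift width to Nat using hpre with w
  rcases Nat.eq_zero_or_pos w with hw | hw
  · subst hw
    rw [pvA_eq_ref a 0, pvRef_zero a (((a.length : Int) - ((0 : Nat) : Int) + 1).toNat) (by omega)]
    simp [horizonal_array_calculation_1d_array_alt]
  · rcases le_or_gt w a.length with hle | hgt
    · obtain ⟨pw, rfl⟩ : ∃ pw, w = pw + 1 := ⟨w - 1, by omega⟩
      rw [pvA_eq_ref a (pw + 1), pvB_eq_ref a pw hle]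
    · unfold horizonal_array_calculation_1d_array horizonal_array_calculation_1d_array_alt
      rw [PySem.List.pyRange_one_eq_nil (by push_cast; omega), if_pos (by push_cast; omega)]
      rfl
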